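-- pv_equiv track=rewrite | github.com/jiahaoxiang2000/sbox-bgc | sbox_to_smt2.py | sbox_to_bits
-- ===== SOURCE A (Python) =====
-- def sbox_to_bits(sbox: list, bits: int = 4) -> list:
--     """
--     Convert S-box values to bit representation.
--
--     Args:
--         sbox: List of S-box values (e.g., [4, 7, 9, 11, ...])
--         bits: Number of bits (3 or 4)
--
--     Returns:
--         List of integers representing the bit columns of the S-box
--     """
--     ys = [0] * bits
--     for i in range(len(sbox)):
--         for bit_pos in range(bits):
--             ys[bits - 1 - bit_pos] = ys[bits - 1 - bit_pos] | (
--                 ((sbox[i] >> bit_pos) & 1) << (len(sbox) - 1 - i)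
--             )
--     return ys
-- ===== SOURCE B (Python) =====
-- def sbox_to_bits(sbox: list, bits: int = 4) -> list:
--     """Transpose S-box values into per-bit column integers.
--
--     Column for bit position p is assembled Horner-style: a single pass over
--     the sbox values, shifting the accumulator left and OR-ing in the next bit.
--     """
--     def col(bit_pos):
--         val = 0
--         for v in sbox:
--             val = (val << 1) | ((v >> bit_pos) & 1)
--         return val
--
--     return [col(bits - 1 - k) for k in range(bits)]
-- ===== Notes on version B (the rewrite author's own statement) =====
-- stated objective: alternative
-- what changed: Instead of OR-ing each bit of each value into a precomputed position of a mutable ys array (inner loop over bit positions per value), B computes each column independently with a Horner-style shift-and-or accumulator over the sbox values, building the result list by comprehension with no mutation.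
import Mathlib
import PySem

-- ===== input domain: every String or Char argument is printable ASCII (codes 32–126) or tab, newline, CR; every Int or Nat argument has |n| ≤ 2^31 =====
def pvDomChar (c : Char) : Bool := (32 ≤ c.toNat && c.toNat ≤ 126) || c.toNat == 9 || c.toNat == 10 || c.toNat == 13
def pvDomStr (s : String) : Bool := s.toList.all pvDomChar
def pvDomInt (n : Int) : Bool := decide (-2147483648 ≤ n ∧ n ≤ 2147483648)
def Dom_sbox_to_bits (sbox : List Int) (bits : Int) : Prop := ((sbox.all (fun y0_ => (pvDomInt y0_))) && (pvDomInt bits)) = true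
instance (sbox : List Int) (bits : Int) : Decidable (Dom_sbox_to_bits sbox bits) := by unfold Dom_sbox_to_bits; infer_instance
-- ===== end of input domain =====

-- B replaces A's in-place OR-into-array double loop by an independent Horner
-- (shift-and-or) accumulation of each bit column; an alternative decomposition
-- of the same work, no mutation.

-- ===== PORT A =====
-- literal transliteration: ys = [0]*bits; for i in range(len(sbox)): for bit_pos
-- in range(bits): ys[bits-1-bp] |= ((sbox[i] >> bp) & 1) << (len(sbox)-1-i).
-- Indices bits-1-bp are always in range, so pyGetD/pySetD are exact; the shift
-- counts bp and len(sbox)-1-i are nonnegative inside the loops, so .toNat /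
-- Nat subtraction are exact.
def sbox_to_bits (sbox : List Int) (bits : Int) : List Int :=
  (PySem.List.pyRange 0 (sbox.length : Int) 1).foldl
    (fun ys i =>
      (PySem.List.pyRange 0 bits 1).foldl
        (fun ys bp =>
          PySem.List.pySetD ys (bits - 1 - bp)
            (PySem.Int.bor (PySem.List.pyGetD ys (bits - 1 - bp) 0)
              ((PySem.Int.band ((PySem.List.pyGetD sbox i 0) >>> bp.toNat) 1)
                <<< (sbox.length - 1 - i.toNat))))
        ys)
    (List.replicate bits.toNat 0)

-- ===== PORT B =====
-- helper col(bit_pos): Horner accumulation val = (val << 1) | ((v >> bit_pos) & 1).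
-- col is only invoked with bit_pos = bits-1-k ≥ 0, so .toNat is exact there.
def pv_col (sbox : List Int) (bit_pos : Int) : Int :=
  sbox.foldl
    (fun val (v : Int) => PySem.Int.bor (val <<< (1:Nat)) (PySem.Int.band (v >>> bit_pos.toNat) 1)) 0

def sbox_to_bits_alt (sbox : List Int) (bits : Int) : List Int :=
  (PySem.List.pyRange 0 bits 1).map (fun k => pv_col sbox (bits - 1 - k))

-- ===== PRECONDITION & SPEC =====
def Spec_sbox_to_bits (sbox : List Int) (bits : Int) (out : List Int) : Prop := out = sbox_to_bits_alt sbox bits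
instance (sbox : List Int) (bits : Int) (out : List Int) : Decidable (Spec_sbox_to_bits sbox bits out) := by unfold Spec_sbox_to_bits; infer_instance

-- ===== CLAIM (what is proved, stated in full; the proofs are below) =====
def Claim_equal_sbox_to_bits : Prop := ∀ (sbox : List Int) (bits : Int), Dom_sbox_to_bits sbox bits → Spec_sbox_to_bits sbox bits (sbox_to_bits sbox bits)

-- ===== LEMMAS AND PROOFS =====

-- A's inner-loop body (one bit OR-ed into its cell), and A's outer-loop body.
def pvIStep (bits x : Int) (s : Nat) : List Int → Int → List Int :=
  fun ys bp =>
    PySem.List.pySetD ys (bits - 1 - bp)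
      (PySem.Int.bor (PySem.List.pyGetD ys (bits - 1 - bp) 0)
        ((PySem.Int.band (x >>> bp.toNat) 1) <<< s))

def pvOStep (sbox : List Int) (bits : Int) : List Int → Int → List Int :=
  fun ys i =>
    (PySem.List.pyRange 0 bits 1).foldl
      (pvIStep bits (PySem.List.pyGetD sbox i 0) (sbox.length - 1 - i.toNat)) ys

theorem pv_unfoldA (sbox : List Int) (bits : Int) :
    sbox_to_bits sbox bits =
      (PySem.List.pyRange 0 (sbox.length : Int) 1).foldl (pvOStep sbox bits)
        (List.replicate bits.toNat 0) := rfl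

theorem pv_bor_nonneg (a b : Int) (ha : 0 ≤ a) (hb : 0 ≤ b) : 0 ≤ PySem.Int.bor a b := by
  rw [PySem.Int.bor_of_nonneg ha hb]; exact Int.natCast_nonneg _

theorem pv_bor_assoc (a b c : Int) (ha : 0 ≤ a) (hb : 0 ≤ b) (hc : 0 ≤ c) :
    PySem.Int.bor (PySem.Int.bor a b) c = PySem.Int.bor a (PySem.Int.bor b c) := by
  rw [PySem.Int.bor_of_nonneg ha hb, PySem.Int.bor_of_nonneg hb hc,
      PySem.Int.bor_of_nonneg (Int.natCast_nonneg _) hc,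
      PySem.Int.bor_of_nonneg ha (Int.natCast_nonneg _)]
  simp [Nat.or_assoc]

theorem pv_bor_zero_left (a : Int) : PySem.Int.bor 0 a = a := by
  rw [PySem.Int.bor_comm]; simp

theorem pv_shl_nonneg (a : Int) (k : Nat) (ha : 0 ≤ a) : 0 ≤ a <<< k := by
  rw [← Int.toNat_of_nonneg ha]
  exact_mod_cast Int.natCast_nonneg ((a.toNat <<< k : Nat))

theorem pv_shift_bor_nat (m n k : Nat) :
    (PySem.Int.bor (m:Int) (n:Int)) <<< k = PySem.Int.bor ((m:Int) <<< k) ((n:Int) <<< k) := by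
  rw [PySem.Int.bor_natCast,
      show ((m ||| n : Nat) : Int) <<< k = (((m ||| n) <<< k : Nat) : Int) from rfl,
      show ((m:Int)) <<< k = ((m <<< k : Nat) : Int) from rfl,
      show ((n:Int)) <<< k = ((n <<< k : Nat) : Int) from rfl,
      PySem.Int.bor_natCast, Nat.shiftLeft_or_distrib]

theorem pv_shift_bor (a b : Int) (k : Nat) (ha : 0 ≤ a) (hb : 0 ≤ b) :
    (PySem.Int.bor a b) <<< k = PySem.Int.bor (a <<< k) (b <<< k) := by
  rw [← Int.toNat_of_nonneg ha, ← Int.toNat_of_nonneg hb]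
  exact pv_shift_bor_nat a.toNat b.toNat k

theorem pv_shl_shl (a : Int) (k1 k2 : Nat) : (a <<< k1) <<< k2 = a <<< (k1 + k2) :=
  (Int.shiftLeft_add a k1 k2).symm

theorem pv_band_one_nonneg (v : Int) : 0 ≤ PySem.Int.band v 1 := by
  rw [PySem.Int.band_one]
  simp only [PySem.Int.mod]
  rw [Int.fmod_eq_emod]
  simp
  exact Int.emod_nonneg v (by norm_num)

theorem pv_col_fold_nonneg (l : List Int) (p : Int) (acc : Int) (h : 0 ≤ acc) :
    0 ≤ l.foldl (fun val (v : Int) => PySem.Int.bor (val <<< (1:Nat)) (PySem.Int.band (v >>> p.toNat) 1)) acc := by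
  induction l generalizing acc with
  | nil => simpa using h
  | cons v l ih =>
    exact ih _ (pv_bor_nonneg _ _ (pv_shl_nonneg _ _ h) (pv_band_one_nonneg _))

theorem pv_col_nonneg (sbox : List Int) (p : Int) : 0 ≤ pv_col sbox p :=
  pv_col_fold_nonneg sbox p 0 le_rfl

-- Horner fold with an arbitrary (nonnegative) accumulator
theorem pv_col_acc (l : List Int) (p : Int) (acc : Int) (h : 0 ≤ acc) :
    l.foldl (fun val (v : Int) => PySem.Int.bor (val <<< (1:Nat)) (PySem.Int.band (v >>> p.toNat) 1)) acc
      = PySem.Int.bor (acc <<< l.length) (pv_col l p) := by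
  induction l generalizing acc with
  | nil => simp [pv_col]
  | cons v l ih =>
    have hstep : 0 ≤ PySem.Int.bor (acc <<< (1:Nat)) (PySem.Int.band (v >>> p.toNat) 1) :=
      pv_bor_nonneg _ _ (pv_shl_nonneg _ _ h) (pv_band_one_nonneg _)
    have hb : 0 ≤ PySem.Int.band (v >>> p.toNat) 1 := pv_band_one_nonneg _
    have hcol0 : pv_col (v :: l) p
        = l.foldl (fun val (v : Int) => PySem.Int.bor (val <<< (1:Nat)) (PySem.Int.band (v >>> p.toNat) 1))
            (PySem.Int.bor ((0:Int) <<< (1:Nat)) (PySem.Int.band (v >>> p.toNat) 1)) := rfl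
    have h0 : PySem.Int.bor ((0:Int) <<< (1:Nat)) (PySem.Int.band (v >>> p.toNat) 1)
        = PySem.Int.band (v >>> p.toNat) 1 := by
      rw [show ((0:Int) <<< (1:Nat)) = 0 from rfl, pv_bor_zero_left]
    rw [List.foldl_cons, ih _ hstep, hcol0, h0, ih _ hb]
    rw [pv_shift_bor _ _ _ (pv_shl_nonneg _ _ h) hb, pv_shl_shl]
    rw [pv_bor_assoc _ _ _ (pv_shl_nonneg _ _ h) (pv_shl_nonneg _ _ hb) (pv_col_nonneg l p)]
    rw [List.length_cons, Nat.add_comm 1 l.length]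

theorem pv_col_cons (v : Int) (l : List Int) (p : Int) :
    pv_col (v :: l) p
      = PySem.Int.bor ((PySem.Int.band (v >>> p.toNat) 1) <<< l.length) (pv_col l p) := by
  have h0 : PySem.Int.bor ((0:Int) <<< (1:Nat)) (PySem.Int.band (v >>> p.toNat) 1)
      = PySem.Int.band (v >>> p.toNat) 1 := by
    rw [show ((0:Int) <<< (1:Nat)) = 0 from rfl, pv_bor_zero_left]
  conv_lhs => rw [pv_col]
  rw [List.foldl_cons, h0, pv_col_acc l p _ (pv_band_one_nonneg _)]

theorem pv_getD_set (l : List Int) (j k : Nat) (v d : Int) (hk : k < l.length) :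
    (l.set j v).getD k d = if j = k then v else l.getD k d := by
  simp [List.getD_eq_getElem?_getD, List.getElem?_set]
  split_ifs <;> simp_all

-- characterization of A's inner loop over the first m bit positions
theorem pv_inner (bits x : Int) (s : Nat) (m : Nat) (hm : (m:Int) ≤ bits) (ys : List Int)
    (hlen : ys.length = bits.toNat) :
    ((PySem.List.pyRange 0 (m:Int) 1).foldl (pvIStep bits x s) ys).length = bits.toNat ∧
    ∀ k : Nat, k < bits.toNat →
      ((PySem.List.pyRange 0 (m:Int) 1).foldl (pvIStep bits x s) ys).getD k 0 =
        if bits.toNat - m ≤ k then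
          PySem.Int.bor (ys.getD k 0) ((PySem.Int.band (x >>> (bits.toNat - 1 - k)) 1) <<< s)
        else ys.getD k 0 := by
  induction m with
  | zero =>
    rw [show ((0:Nat):Int) = 0 from rfl, PySem.List.pyRange_one_eq_nil le_rfl, List.foldl_nil]
    exact ⟨hlen, fun k hk => by rw [if_neg (by omega)]⟩
  | succ m ih =>
    have hm' : (m:Int) ≤ bits := by push_cast at hm ⊢; omega
    have hmB : m < bits.toNat := by omega
    obtain ⟨ihlen, ihget⟩ := ih hm'
    rw [show ((m+1:Nat):Int) = (m:Int)+1 by push_cast; ring,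
        PySem.List.pyRange_one_succ_right (by positivity), List.foldl_append, List.foldl_cons,
        List.foldl_nil]
    set prev := (PySem.List.pyRange 0 (m:Int) 1).foldl (pvIStep bits x s) ys with hprev
    have hj0 : (0:Int) ≤ bits - 1 - (m:Int) := by omega
    have hj : ((bits - 1 - (m:Int))).toNat = bits.toNat - 1 - m := by omega
    simp only [pvIStep]
    rw [PySem.List.pySetD_of_nonneg _ _ hj0, PySem.List.pyGetD_of_nonneg _ _ hj0, hj]
    refine ⟨by rw [List.length_set]; exact ihlen, fun k hk => ?_⟩
    rw [pv_getD_set _ _ _ _ _ (by omega)]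
    by_cases hcase : bits.toNat - 1 - m = k
    · rw [if_pos hcase, ihget _ (by omega), if_neg (by omega), if_pos (by omega)]
      subst hcase
      rw [show bits.toNat - 1 - (bits.toNat - 1 - m) = m from by omega, Int.toNat_natCast]
    · rw [if_neg hcase, ihget _ hk]
      by_cases h2 : bits.toNat - m ≤ k
      · rw [if_pos h2, if_pos (by omega)]
      · rw [if_neg h2, if_neg (by omega)]

-- characterization of A's outer loop from index a on: each cell k accumulates
-- (by OR) exactly the Horner column of the remaining suffix
theorem pv_outer (sbox : List Int) (bits : Int) (hb : 0 < bits) (a : Nat) (ha : a ≤ sbox.length)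
    (ys : List Int) (hlen : ys.length = bits.toNat)
    (hnn : ∀ k, k < bits.toNat → 0 ≤ ys.getD k 0) :
    ((PySem.List.pyRange (a:Int) (sbox.length:Int) 1).foldl (pvOStep sbox bits) ys).length = bits.toNat ∧
    ∀ k : Nat, k < bits.toNat →
      ((PySem.List.pyRange (a:Int) (sbox.length:Int) 1).foldl (pvOStep sbox bits) ys).getD k 0
        = PySem.Int.bor (ys.getD k 0) (pv_col (sbox.drop a) (bits - 1 - (k:Int))) := by
  obtain ⟨d, hd⟩ : ∃ d, sbox.length - a = d := ⟨_, rfl⟩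
  induction d generalizing a ys with
  | zero =>
    have haa : a = sbox.length := by omega
    subst haa
    rw [PySem.List.pyRange_one_eq_nil le_rfl, List.foldl_nil, List.drop_length]
    exact ⟨hlen, fun k hk => by simp [pv_col]⟩
  | succ d ihd =>
    have hlt : a < sbox.length := by omega
    rw [PySem.List.pyRange_one_cons (by exact_mod_cast hlt), List.foldl_cons]
    have hstep : pvOStep sbox bits ys (a:Int)
        = (PySem.List.pyRange 0 bits 1).foldl
            (pvIStep bits (PySem.List.pyGetD sbox (a:Int) 0) (sbox.length - 1 - a)) ys := by
      simp only [pvOStep, Int.toNat_natCast]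
    rw [hstep]
    have hcast : ((bits.toNat : Nat) : Int) = bits := Int.toNat_of_nonneg hb.le
    obtain ⟨ilen, iget⟩ := pv_inner bits (PySem.List.pyGetD sbox (a:Int) 0) (sbox.length - 1 - a)
      bits.toNat (by rw [hcast]) ys hlen
    rw [hcast] at ilen iget
    set x := PySem.List.pyGetD sbox (a:Int) 0 with hx
    set ys1 := (PySem.List.pyRange 0 bits 1).foldl (pvIStep bits x (sbox.length - 1 - a)) ys with hys1
    have hys1get : ∀ k, k < bits.toNat → ys1.getD k 0
        = PySem.Int.bor (ys.getD k 0)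
            ((PySem.Int.band (x >>> (bits.toNat - 1 - k)) 1) <<< (sbox.length - 1 - a)) := by
      intro k hk; rw [iget k hk, if_pos (by omega)]
    have hys1nn : ∀ k, k < bits.toNat → 0 ≤ ys1.getD k 0 := fun k hk => by
      rw [hys1get k hk]
      exact pv_bor_nonneg _ _ (hnn k hk) (pv_shl_nonneg _ _ (pv_band_one_nonneg _))
    have hrec := ihd (a+1) (by omega) ys1 ilen hys1nn (by omega)
    rw [show (((a+1:Nat)):Int) = (a:Int)+1 by push_cast; ring] at hrec
    obtain ⟨rlen, rget⟩ := hrec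
    refine ⟨rlen, fun k hk => ?_⟩
    rw [rget k hk, hys1get k hk]
    have hdrop : sbox.drop a = sbox[a] :: sbox.drop (a+1) := List.drop_eq_getElem_cons hlt
    have hxval : x = sbox[a] := by
      simp only [hx]
      rw [PySem.List.pyGetD_of_nonneg _ _ (Int.natCast_nonneg a), Int.toNat_natCast,
          List.getD_eq_getElem _ _ hlt]
    have hlen2 : (sbox.drop (a+1)).length = sbox.length - 1 - a := by
      rw [List.length_drop]; omega
    rw [hdrop, pv_col_cons, ← hxval, hlen2,
        show (bits - 1 - (k:Int)).toNat = bits.toNat - 1 - k from by omega,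
        pv_bor_assoc _ _ _ (hnn k hk) (pv_shl_nonneg _ _ (pv_band_one_nonneg _)) (pv_col_nonneg _ _)]

-- ===== VERDICT (by name: the statement is the Claim_ definition above) =====
theorem sbox_to_bits_spec : Claim_equal_sbox_to_bits := by
  intro sbox bits _
  unfold Spec_sbox_to_bits sbox_to_bits_alt
  by_cases hb : 0 < bits
  · have hcast0 : ((0:Nat):Int) = 0 := rfl
    obtain ⟨rlen, rget⟩ := pv_outer sbox bits hb 0 (Nat.zero_le _) (List.replicate bits.toNat 0)
      (by simp) (fun k hk => by simp)
    rw [hcast0] at rlen rget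
    simp only [List.drop_zero] at rget
    rw [pv_unfoldA]
    apply List.ext_getElem
    · rw [rlen, List.length_map, PySem.List.length_pyRange_one]
      omega
    · intro k h1 h2
      rw [← List.getD_eq_getElem _ 0 h1]
      have hkB : k < bits.toNat := by rw [rlen] at h1; exact h1
      rw [rget k hkB]
      rw [List.getElem_map, PySem.List.getElem_pyRange_one]
      rw [show List.getD (List.replicate bits.toNat (0:Int)) k 0 = 0 from by simp,
          pv_bor_zero_left, zero_add]
  · have h1 : PySem.List.pyRange 0 bits 1 = [] := PySem.List.pyRange_one_eq_nil (by omega)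
    have hO : pvOStep sbox bits = fun ys _ => ys := by
      funext ys i; simp [pvOStep, h1]
    rw [pv_unfoldA, hO, List.foldl_fixed, show bits.toNat = 0 from by omega,
        List.replicate_zero, h1, List.map_nil]
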